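-- pv_equiv track=rewrite | github.com/Tanujaa-23/resume_skill_gap_analyzer_HR | analyzer/utils.py | skills_match
-- ===== SOURCE A (Python) =====
-- def get_skill_synonyms():
--     """Define skill synonyms and variations for better matching"""
--     return {
--         'javascript': ['js', 'javascript', 'ecmascript'],
--         'typescript': ['ts', 'typescript'],
--         'python': ['python', 'python 2', 'python 3', 'py'],
--         'html': ['html', 'html5'],
--         'css': ['css', 'css3'],
--         'react': ['react', 'reactjs', 'react.js'],
--         'angular': ['angular', 'angularjs', 'angular.js'],
--         'vue': ['vue', 'vuejs', 'vue.js'],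
--         'node': ['node', 'nodejs', 'node.js'],
--         'express': ['express', 'expressjs', 'express.js'],
--         'mongodb': ['mongodb', 'mongo'],
--         'postgresql': ['postgresql', 'postgres'],
--         'sql server': ['sql server', 'mssql', 'microsoft sql server'],
--         'aws': ['aws', 'amazon web services'],
--         'gcp': ['gcp', 'google cloud', 'google cloud platform'],
--         'azure': ['azure', 'microsoft azure'],
--         'kubernetes': ['kubernetes', 'k8s'],
--         'golang': ['go', 'golang'],
--         'machine learning': ['machine learning', 'ml'],
--         'artificial intelligence': ['artificial intelligence', 'ai'],
--         'natural language processing': ['nlp', 'natural language processing'],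
--         'scikit-learn': ['scikit-learn', 'sklearn', 'scikit learn'],
--         'ui/ux': ['ui/ux', 'ui design', 'ux design', 'user interface', 'user experience'],
--         'rest api': ['rest', 'rest api', 'rest apis', 'restful', 'restful api', 'api', 'apis'],
--         'object oriented programming': ['oop', 'object oriented programming', 'object-oriented'],
--         'full stack': ['full stack', 'fullstack', 'full-stack'],
--         'ci/cd': ['ci/cd', 'continuous integration', 'continuous deployment'],
--         'test driven development': ['tdd', 'test driven development', 'test-driven'],
--         'responsive design': ['responsive design', 'responsive web design'],
--         'github': ['github', 'git hub'],
--         'vs code': ['vs code', 'vscode', 'visual studio code'],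
--         'bootstrap': ['bootstrap', 'bootstrap 4', 'bootstrap 5'],
--         'django': ['django', 'django framework'],
--         'mysql': ['mysql', 'my sql'],
--         'responsive design': ['responsive design', 'responsive web design', 'web design', 'responsive'],
--         'seo': ['seo', 'basic seo', 'search engine optimization'],
--         'excel': ['excel', 'microsoft excel', 'ms excel', 'spreadsheet'],
--         'power bi': ['power bi', 'powerbi', 'power-bi'],
--         'tableau': ['tableau', 'tableau desktop'],
--         'sql': ['sql', 'mysql', 'postgresql', 'sql server', 'database', 'databases'],
--         'data analysis': ['data analysis', 'data analytics', 'analytics', 'data analyst'],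
--         'data visualization': ['data visualization', 'data visualisation', 'visualization', 'visualisation'],
--         'statistics': ['statistics', 'statistical analysis', 'statistical'],
--         'data modeling': ['data modeling', 'data modelling', 'modeling', 'modelling'],
--         'problem solving': ['problem solving', 'problem-solving', 'analytical skills', 'analytical'],
--         'communication': ['communication', 'communicate', 'presentation'],
--         'computer science': ['computer science', 'cs', 'it', 'information technology'],
--         'bachelor': ['bachelor', 'bachelors', 'bachelor degree', 'bachelors degree', 'btech', 'be', 'bsc'],
--     }
--
-- def normalize_skill(skill):
--     """Normalize skill name to its canonical form"""
--     skill_lower = skill.lower().strip()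
--     synonyms = get_skill_synonyms()
--
--     # Check if skill matches any synonym group
--     for canonical, variations in synonyms.items():
--         if skill_lower in [v.lower() for v in variations]:
--             return canonical
--
--     return skill_lower
--
-- def skills_match(skill1, skill2):
--     """Check if two skills match (considering synonyms)"""
--     norm1 = normalize_skill(skill1)
--     norm2 = normalize_skill(skill2)
--
--     # Direct match
--     if norm1 == norm2:
--         return True
--
--     # Check if they belong to the same synonym group
--     synonyms = get_skill_synonyms()
--     for canonical, variations in synonyms.items():
--         variations_lower = [v.lower() for v in variations]
--         if norm1 in variations_lower and norm2 in variations_lower: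
--             return True
--
--     return False
-- ===== SOURCE B (Python) =====
-- # B: the synonym data is shipped pre-lowered as (canonical, comma-joined variants)
-- # rows, parsed once at import time into two lookup tables, so a call is two dict
-- # lookups and a set-intersection test instead of A's nested scans over every group.
--
-- _DATA = [
--     ('javascript', 'js,javascript,ecmascript'),
--     ('typescript', 'ts,typescript'),
--     ('python', 'python,python 2,python 3,py'),
--     ('html', 'html,html5'),
--     ('css', 'css,css3'),
--     ('react', 'react,reactjs,react.js'),
--     ('angular', 'angular,angularjs,angular.js'),
--     ('vue', 'vue,vuejs,vue.js'),
--     ('node', 'node,nodejs,node.js'),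
--     ('express', 'express,expressjs,express.js'),
--     ('mongodb', 'mongodb,mongo'),
--     ('postgresql', 'postgresql,postgres'),
--     ('sql server', 'sql server,mssql,microsoft sql server'),
--     ('aws', 'aws,amazon web services'),
--     ('gcp', 'gcp,google cloud,google cloud platform'),
--     ('azure', 'azure,microsoft azure'),
--     ('kubernetes', 'kubernetes,k8s'),
--     ('golang', 'go,golang'),
--     ('machine learning', 'machine learning,ml'),
--     ('artificial intelligence', 'artificial intelligence,ai'),
--     ('natural language processing', 'nlp,natural language processing'),
--     ('scikit-learn', 'scikit-learn,sklearn,scikit learn'),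
--     ('ui/ux', 'ui/ux,ui design,ux design,user interface,user experience'),
--     ('rest api', 'rest,rest api,rest apis,restful,restful api,api,apis'),
--     ('object oriented programming', 'oop,object oriented programming,object-oriented'),
--     ('full stack', 'full stack,fullstack,full-stack'),
--     ('ci/cd', 'ci/cd,continuous integration,continuous deployment'),
--     ('test driven development', 'tdd,test driven development,test-driven'),
--     ('responsive design', 'responsive design,responsive web design,web design,responsive'),
--     ('github', 'github,git hub'),
--     ('vs code', 'vs code,vscode,visual studio code'),
--     ('bootstrap', 'bootstrap,bootstrap 4,bootstrap 5'),
--     ('django', 'django,django framework'),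
--     ('mysql', 'mysql,my sql'),
--     ('seo', 'seo,basic seo,search engine optimization'),
--     ('excel', 'excel,microsoft excel,ms excel,spreadsheet'),
--     ('power bi', 'power bi,powerbi,power-bi'),
--     ('tableau', 'tableau,tableau desktop'),
--     ('sql', 'sql,mysql,postgresql,sql server,database,databases'),
--     ('data analysis', 'data analysis,data analytics,analytics,data analyst'),
--     ('data visualization', 'data visualization,data visualisation,visualization,visualisation'),
--     ('statistics', 'statistics,statistical analysis,statistical'),
--     ('data modeling', 'data modeling,data modelling,modeling,modelling'),
--     ('problem solving', 'problem solving,problem-solving,analytical skills,analytical'),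
--     ('communication', 'communication,communicate,presentation'),
--     ('computer science', 'computer science,cs,it,information technology'),
--     ('bachelor', 'bachelor,bachelors,bachelor degree,bachelors degree,btech,be,bsc'),
-- ]
--
-- _NORM = {}
-- _GROUPS = {}
-- for _canonical, _vars in _DATA:
--     for _v in _vars.split(','):
--         _NORM.setdefault(_v, _canonical)
--         _GROUPS.setdefault(_v, set()).add(_canonical)
--
-- def skills_match(skill1, skill2):
--     t1 = skill1.lower().strip()
--     t2 = skill2.lower().strip()
--     n1 = _NORM.get(t1, t1)
--     n2 = _NORM.get(t2, t2)
--     return n1 == n2 or not _GROUPS.get(n1, set()).isdisjoint(_GROUPS.get(n2, set()))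
-- ===== Notes on version B (the rewrite author's own statement) =====
-- stated objective: alternative
-- what changed: B ships the synonym data as compact pre-lowered (canonical, comma-joined variants) rows parsed once at import time into two lookup tables (variant -> first canonical, variant -> set of canonical groups), so each call is two dict lookups plus a set-intersection test instead of A's call-time nested scans over every synonym group (re-lowering every variation list) in both normalize_skill and the matching loop.
import Mathlib
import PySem

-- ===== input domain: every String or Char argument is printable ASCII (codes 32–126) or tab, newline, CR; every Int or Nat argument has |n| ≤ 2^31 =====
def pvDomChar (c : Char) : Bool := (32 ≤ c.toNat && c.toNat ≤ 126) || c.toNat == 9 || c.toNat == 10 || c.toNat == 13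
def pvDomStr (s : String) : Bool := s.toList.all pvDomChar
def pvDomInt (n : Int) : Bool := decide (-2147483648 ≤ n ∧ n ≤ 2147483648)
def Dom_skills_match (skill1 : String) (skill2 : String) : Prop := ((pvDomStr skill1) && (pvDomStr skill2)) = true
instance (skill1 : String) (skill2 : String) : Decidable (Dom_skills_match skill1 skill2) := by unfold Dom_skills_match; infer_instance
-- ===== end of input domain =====

-- B replaces A's call-time scans over the synonym dict with two tables built once at
-- import time from compact pre-lowered (canonical, comma-joined variants) rows
-- (variant -> first canonical; variant -> set of canonical groups), so a match is two
-- lookups and a set-intersection test (objective: alternative).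

-- ===== PORT A =====
-- same-module helper: the synonym dict (the Python literal repeats the key
-- 'responsive design'; per Python dict semantics the later value wins at the first
-- position, so the effective 47 items are listed here)
def get_skill_synonyms : List (String × List String) := [
  ("javascript", ["js", "javascript", "ecmascript"]),
  ("typescript", ["ts", "typescript"]),
  ("python", ["python", "python 2", "python 3", "py"]),
  ("html", ["html", "html5"]),
  ("css", ["css", "css3"]),
  ("react", ["react", "reactjs", "react.js"]),
  ("angular", ["angular", "angularjs", "angular.js"]),
  ("vue", ["vue", "vuejs", "vue.js"]),
  ("node", ["node", "nodejs", "node.js"]),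
  ("express", ["express", "expressjs", "express.js"]),
  ("mongodb", ["mongodb", "mongo"]),
  ("postgresql", ["postgresql", "postgres"]),
  ("sql server", ["sql server", "mssql", "microsoft sql server"]),
  ("aws", ["aws", "amazon web services"]),
  ("gcp", ["gcp", "google cloud", "google cloud platform"]),
  ("azure", ["azure", "microsoft azure"]),
  ("kubernetes", ["kubernetes", "k8s"]),
  ("golang", ["go", "golang"]),
  ("machine learning", ["machine learning", "ml"]),
  ("artificial intelligence", ["artificial intelligence", "ai"]),
  ("natural language processing", ["nlp", "natural language processing"]),
  ("scikit-learn", ["scikit-learn", "sklearn", "scikit learn"]),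
  ("ui/ux", ["ui/ux", "ui design", "ux design", "user interface", "user experience"]),
  ("rest api", ["rest", "rest api", "rest apis", "restful", "restful api", "api", "apis"]),
  ("object oriented programming", ["oop", "object oriented programming", "object-oriented"]),
  ("full stack", ["full stack", "fullstack", "full-stack"]),
  ("ci/cd", ["ci/cd", "continuous integration", "continuous deployment"]),
  ("test driven development", ["tdd", "test driven development", "test-driven"]),
  ("responsive design", ["responsive design", "responsive web design", "web design", "responsive"]),
  ("github", ["github", "git hub"]),
  ("vs code", ["vs code", "vscode", "visual studio code"]),
  ("bootstrap", ["bootstrap", "bootstrap 4", "bootstrap 5"]),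
  ("django", ["django", "django framework"]),
  ("mysql", ["mysql", "my sql"]),
  ("seo", ["seo", "basic seo", "search engine optimization"]),
  ("excel", ["excel", "microsoft excel", "ms excel", "spreadsheet"]),
  ("power bi", ["power bi", "powerbi", "power-bi"]),
  ("tableau", ["tableau", "tableau desktop"]),
  ("sql", ["sql", "mysql", "postgresql", "sql server", "database", "databases"]),
  ("data analysis", ["data analysis", "data analytics", "analytics", "data analyst"]),
  ("data visualization", ["data visualization", "data visualisation", "visualization", "visualisation"]),
  ("statistics", ["statistics", "statistical analysis", "statistical"]),
  ("data modeling", ["data modeling", "data modelling", "modeling", "modelling"]),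
  ("problem solving", ["problem solving", "problem-solving", "analytical skills", "analytical"]),
  ("communication", ["communication", "communicate", "presentation"]),
  ("computer science", ["computer science", "cs", "it", "information technology"]),
  ("bachelor", ["bachelor", "bachelors", "bachelor degree", "bachelors degree", "btech", "be", "bsc"])]

-- 'skill_lower' is written out inline (a pure local variable of the Python)
def normalize_skill (skill : String) : String :=
  match get_skill_synonyms.find? (fun cv => ((cv.2.map PySem.Str.lower).contains (PySem.Str.strip (PySem.Str.lower skill)))) with
  | some cv => cv.1
  | none => PySem.Str.strip (PySem.Str.lower skill)

-- 'norm1'/'norm2'/'variations_lower' likewise written out inline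
def skills_match (skill1 : String) (skill2 : String) : Bool :=
  if normalize_skill skill1 == normalize_skill skill2 then true
  else
    get_skill_synonyms.any (fun cv =>
      (cv.2.map PySem.Str.lower).contains (normalize_skill skill1)
        && (cv.2.map PySem.Str.lower).contains (normalize_skill skill2))

-- ===== PORT B =====
-- Source B's module-level data: pre-lowered rows (canonical, comma-joined variants)
def pvData : List (String × String) := [
  ("javascript", "js,javascript,ecmascript"),
  ("typescript", "ts,typescript"),
  ("python", "python,python 2,python 3,py"),
  ("html", "html,html5"),
  ("css", "css,css3"),
  ("react", "react,reactjs,react.js"),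
  ("angular", "angular,angularjs,angular.js"),
  ("vue", "vue,vuejs,vue.js"),
  ("node", "node,nodejs,node.js"),
  ("express", "express,expressjs,express.js"),
  ("mongodb", "mongodb,mongo"),
  ("postgresql", "postgresql,postgres"),
  ("sql server", "sql server,mssql,microsoft sql server"),
  ("aws", "aws,amazon web services"),
  ("gcp", "gcp,google cloud,google cloud platform"),
  ("azure", "azure,microsoft azure"),
  ("kubernetes", "kubernetes,k8s"),
  ("golang", "go,golang"),
  ("machine learning", "machine learning,ml"),
  ("artificial intelligence", "artificial intelligence,ai"),
  ("natural language processing", "nlp,natural language processing"),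
  ("scikit-learn", "scikit-learn,sklearn,scikit learn"),
  ("ui/ux", "ui/ux,ui design,ux design,user interface,user experience"),
  ("rest api", "rest,rest api,rest apis,restful,restful api,api,apis"),
  ("object oriented programming", "oop,object oriented programming,object-oriented"),
  ("full stack", "full stack,fullstack,full-stack"),
  ("ci/cd", "ci/cd,continuous integration,continuous deployment"),
  ("test driven development", "tdd,test driven development,test-driven"),
  ("responsive design", "responsive design,responsive web design,web design,responsive"),
  ("github", "github,git hub"),
  ("vs code", "vs code,vscode,visual studio code"),
  ("bootstrap", "bootstrap,bootstrap 4,bootstrap 5"),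
  ("django", "django,django framework"),
  ("mysql", "mysql,my sql"),
  ("seo", "seo,basic seo,search engine optimization"),
  ("excel", "excel,microsoft excel,ms excel,spreadsheet"),
  ("power bi", "power bi,powerbi,power-bi"),
  ("tableau", "tableau,tableau desktop"),
  ("sql", "sql,mysql,postgresql,sql server,database,databases"),
  ("data analysis", "data analysis,data analytics,analytics,data analyst"),
  ("data visualization", "data visualization,data visualisation,visualization,visualisation"),
  ("statistics", "statistics,statistical analysis,statistical"),
  ("data modeling", "data modeling,data modelling,modeling,modelling"),
  ("problem solving", "problem solving,problem-solving,analytical skills,analytical"),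
  ("communication", "communication,communicate,presentation"),
  ("computer science", "computer science,cs,it,information technology"),
  ("bachelor", "bachelor,bachelors,bachelor degree,bachelors degree,btech,be,bsc")]

-- _vars.split(',') — sep is non-empty so Python never raises; getD [] is unreachable
def pvVariants (vars : String) : List String := (PySem.Str.split? vars ",").getD []

-- import-time table-building loop of Source B (setdefault / set.add per variant)
def pvNormTable : PySem.Dict String String :=
  pvData.foldl
    (fun d cv => (pvVariants cv.2).foldl (fun d v => d.setdefault v cv.1) d)
    PySem.Dict.empty

def pvGroupTable : PySem.Dict String (PySem.Set String) :=
  pvData.foldl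
    (fun d cv => (pvVariants cv.2).foldl
      (fun d v => d.modify v PySem.Set.empty (fun s => s.add cv.1)) d)
    PySem.Dict.empty

-- Source B's locals t1/t2/n1/n2 written out inline
def skills_match_alt (skill1 : String) (skill2 : String) : Bool :=
  (pvNormTable.getD (PySem.Str.strip (PySem.Str.lower skill1)) (PySem.Str.strip (PySem.Str.lower skill1))
    == pvNormTable.getD (PySem.Str.strip (PySem.Str.lower skill2)) (PySem.Str.strip (PySem.Str.lower skill2)))
  || !(PySem.Set.isdisjoint
       (pvGroupTable.getD (pvNormTable.getD (PySem.Str.strip (PySem.Str.lower skill1)) (PySem.Str.strip (PySem.Str.lower skill1))) PySem.Set.empty)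
       (pvGroupTable.getD (pvNormTable.getD (PySem.Str.strip (PySem.Str.lower skill2)) (PySem.Str.strip (PySem.Str.lower skill2))) PySem.Set.empty))

-- ===== PRECONDITION & SPEC =====
def Spec_skills_match (skill1 : String) (skill2 : String) (out : Bool) : Prop := out = skills_match_alt skill1 skill2
instance (skill1 : String) (skill2 : String) (out : Bool) : Decidable (Spec_skills_match skill1 skill2 out) := by unfold Spec_skills_match; infer_instance

-- ===== CLAIM (what is proved, stated in full; the proofs are below) =====
def Claim_equal_skills_match : Prop := ∀ (skill1 : String) (skill2 : String), Dom_skills_match skill1 skill2 → Spec_skills_match skill1 skill2 (skills_match skill1 skill2)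

-- ===== LEMMAS AND PROOFS =====

-- parsing Source B's compact rows yields exactly A's (lowered) synonym groups
def pvParse (cv : String × String) : String × List String := (cv.1, pvVariants cv.2)

set_option maxRecDepth 1000000 in
set_option maxHeartbeats 4000000 in
theorem pv_parsed_eq :
    pvData.map pvParse = get_skill_synonyms.map (fun cv => (cv.1, cv.2.map PySem.Str.lower)) := by
  decide

-- setdefault is "insert only if absent": first write wins
theorem pv_setdefault_get? (d : PySem.Dict String String) (k v t : String) :
    (d.setdefault k v).get? t = (d.get? t).or (if t = k then some v else none) := by
  by_cases ht : t = k
  · subst ht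
    rw [PySem.Dict.get?_setdefault_self]
    cases d.get? t <;> simp
  · rw [PySem.Dict.get?_setdefault_of_ne d v ht]
    simp [ht]

-- the per-group fold of setdefault over a variation list
theorem pv_norm_inner (vars : List String) (c : String) (d : PySem.Dict String String) (t : String) :
    (vars.foldl (fun d v => d.setdefault v c) d).get? t
      = (d.get? t).or (if t ∈ vars then some c else none) := by
  induction vars generalizing d with
  | nil => simp
  | cons v vs ih =>
    rw [List.foldl_cons, ih, pv_setdefault_get?, Option.or_assoc]
    congr 1
    by_cases h1 : t = v
    · simp [h1]
    · by_cases h2 : t ∈ vs <;> simp [h1, h2]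

-- the whole normalize-table fold: lookup = first row whose variants contain the token
theorem pv_norm_outer (gs : List (String × String)) (d : PySem.Dict String String) (t : String) :
    (gs.foldl (fun d cv => (pvVariants cv.2).foldl (fun d v => d.setdefault v cv.1) d) d).get? t
      = (d.get? t).or ((gs.find? (fun cv => ((pvVariants cv.2).contains t))).map Prod.fst) := by
  induction gs generalizing d with
  | nil => simp
  | cons cv gs ih =>
    rw [List.foldl_cons, ih, pv_norm_inner, Option.or_assoc]
    cases hcv : ((pvVariants cv.2).contains t) with
    | true =>
      simp only [List.find?_cons, hcv]
      have hm : t ∈ pvVariants cv.2 := List.contains_iff_mem.mp hcv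
      simp [hm]
    | false =>
      simp only [List.find?_cons, hcv]
      have hm : t ∉ pvVariants cv.2 := by
        intro h
        rw [← List.contains_iff_mem, hcv] at h
        exact Bool.false_ne_true h
      simp [hm]

-- B's first-match row over the compact rows = A's find? over the synonym dict
theorem pv_find_eq (t : String) :
    (pvData.find? (fun cv => ((pvVariants cv.2).contains t))).map Prod.fst
      = (get_skill_synonyms.find? (fun cv => ((cv.2.map PySem.Str.lower).contains t))).map Prod.fst := by
  have h1 := @List.find?_map _ _ (fun cv : String × List String => cv.2.contains t) pvParse pvData
  have h2 := @List.find?_map _ _ (fun cv : String × List String => cv.2.contains t)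
      (fun cv : String × List String => (cv.1, cv.2.map PySem.Str.lower)) get_skill_synonyms
  rw [pv_parsed_eq, h2] at h1
  have h3 : pvData.find? (fun cv => ((pvVariants cv.2).contains t))
      = pvData.find? ((fun cv : String × List String => cv.2.contains t) ∘ pvParse) := rfl
  rw [h3]
  have h4 := congrArg (Option.map Prod.fst) h1
  rw [Option.map_map, Option.map_map] at h4
  exact h4.symm

-- the two normalizations agree
theorem pv_normalize_eq (s : String) :
    pvNormTable.getD (PySem.Str.strip (PySem.Str.lower s)) (PySem.Str.strip (PySem.Str.lower s))
      = normalize_skill s := by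
  unfold normalize_skill pvNormTable
  rw [PySem.Dict.getD_eq_get?_getD, pv_norm_outer, PySem.Dict.get?_empty, Option.none_or, pv_find_eq]
  cases h : List.find?
      (fun cv => (List.map PySem.Str.lower cv.2).contains (PySem.Str.strip (PySem.Str.lower s)))
      get_skill_synonyms with
  | none => rfl
  | some cv => rfl

-- membership in the reverse index: per-row fold
theorem pv_group_inner (vars : List String) (c : String) (d : PySem.Dict String (PySem.Set String)) (t x : String) :
    (x ∈ (vars.foldl (fun d v => d.modify v PySem.Set.empty (fun s => s.add c)) d).getD t PySem.Set.empty)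
      ↔ x ∈ d.getD t PySem.Set.empty ∨ (x = c ∧ t ∈ vars) := by
  induction vars generalizing d with
  | nil => simp
  | cons v vs ih =>
    rw [List.foldl_cons, ih]
    rw [PySem.Dict.getD_modify]
    by_cases h1 : t = v
    · rw [if_pos h1]
      rw [PySem.Set.mem_add]
      constructor
      · rintro ((h | h) | h)
        · exact Or.inl (h1 ▸ h)
        · exact Or.inr ⟨h, by simp [h1]⟩
        · exact Or.inr ⟨h.1, by simp [h.2]⟩
      · rintro (h | ⟨hx, _⟩)
        · exact Or.inl (Or.inl (h1 ▸ h))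
        · exact Or.inl (Or.inr hx)
    · rw [if_neg h1]
      constructor
      · rintro (h | h)
        · exact Or.inl h
        · exact Or.inr ⟨h.1, by simp [h.2]⟩
      · rintro (h | ⟨hx, hm⟩)
        · exact Or.inl h
        · rcases List.mem_cons.mp hm with h | h
          · exact absurd h h1
          · exact Or.inr ⟨hx, h⟩

theorem pv_group_outer (gs : List (String × String)) (d : PySem.Dict String (PySem.Set String)) (t x : String) :
    (x ∈ (gs.foldl (fun d cv => (pvVariants cv.2).foldl (fun d v => d.modify v PySem.Set.empty (fun s => s.add cv.1)) d) d).getD t PySem.Set.empty)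
      ↔ x ∈ d.getD t PySem.Set.empty ∨ ∃ cv ∈ gs, x = cv.1 ∧ t ∈ pvVariants cv.2 := by
  induction gs generalizing d with
  | nil => simp
  | cons cv gs ih =>
    rw [List.foldl_cons, ih, pv_group_inner]
    constructor
    · rintro ((h | h) | ⟨g, hg, hx⟩)
      · exact Or.inl h
      · exact Or.inr ⟨cv, List.mem_cons_self, h⟩
      · exact Or.inr ⟨g, List.mem_cons_of_mem _ hg, hx⟩
    · rintro (h | ⟨g, hg, hx⟩)
      · exact Or.inl (Or.inl h)
      · rcases List.mem_cons.mp hg with h | h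
        · exact Or.inl (Or.inr (h ▸ hx))
        · exact Or.inr ⟨g, h, hx⟩

-- membership in B's reverse index = "some group of A's dict lists this token"
theorem pv_group_mem (t x : String) :
    (x ∈ pvGroupTable.getD t PySem.Set.empty)
      ↔ ∃ cv ∈ get_skill_synonyms, x = cv.1 ∧ t ∈ cv.2.map PySem.Str.lower := by
  unfold pvGroupTable
  rw [pv_group_outer, PySem.Dict.getD_empty]
  simp only [PySem.Set.empty, List.not_mem_nil, false_or]
  constructor
  · rintro ⟨cv, hcv, hx, ht⟩
    have hm : pvParse cv ∈ pvData.map pvParse := List.mem_map_of_mem hcv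
    rw [pv_parsed_eq] at hm
    obtain ⟨g, hg, hge⟩ := List.mem_map.mp hm
    have h1 : g.1 = cv.1 := congrArg Prod.fst hge
    have h2 : g.2.map PySem.Str.lower = pvVariants cv.2 := congrArg Prod.snd hge
    exact ⟨g, hg, by rw [hx, ← h1], by rw [h2]; exact ht⟩
  · rintro ⟨g, hg, hx, ht⟩
    have hm : (g.1, g.2.map PySem.Str.lower)
        ∈ get_skill_synonyms.map (fun cv => (cv.1, cv.2.map PySem.Str.lower)) := List.mem_map_of_mem hg
    rw [← pv_parsed_eq] at hm
    obtain ⟨cv, hcv, hce⟩ := List.mem_map.mp hm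
    have h1 : cv.1 = g.1 := congrArg Prod.fst hce
    have h2 : pvVariants cv.2 = g.2.map PySem.Str.lower := congrArg Prod.snd hce
    exact ⟨cv, hcv, by rw [hx, ← h1], by rw [h2]; exact ht⟩

-- the canonical names of the 47 groups are pairwise distinct
theorem pv_keys_nodup : (get_skill_synonyms.map Prod.fst).Nodup := by decide

-- ===== VERDICT (by name: the statement is the Claim_ definition above) =====
theorem skills_match_spec : Claim_equal_skills_match := by
  intro s1 s2 _
  show skills_match s1 s2 = skills_match_alt s1 s2
  unfold skills_match skills_match_alt
  rw [pv_normalize_eq s1, pv_normalize_eq s2]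
  have hmem1 := fun x => pv_group_mem (normalize_skill s1) x
  have hmem2 := fun x => pv_group_mem (normalize_skill s2) x
  set G1 := pvGroupTable.getD (normalize_skill s1) PySem.Set.empty with hG1
  set G2 := pvGroupTable.getD (normalize_skill s2) PySem.Set.empty with hG2
  generalize (normalize_skill s1 == normalize_skill s2) = e
  cases e with
  | true => rfl
  | false =>
    simp only [Bool.false_eq_true, if_false, Bool.false_or]
    rw [Bool.eq_iff_iff]
    unfold PySem.Set.isdisjoint
    rw [Bool.not_not, List.any_eq_true, List.any_eq_true]
    constructor
    · rintro ⟨cv, hcv, hb⟩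
      obtain ⟨h1, h2⟩ := Bool.and_eq_true_iff.mp hb
      refine ⟨cv.1, ?_, ?_⟩
      · exact (hmem1 _).mpr ⟨cv, hcv, rfl, List.contains_iff_mem.mp h1⟩
      · exact (PySem.Set.contains_iff _ _).mpr ((hmem2 _).mpr ⟨cv, hcv, rfl, List.contains_iff_mem.mp h2⟩)
    · rintro ⟨x, hx1, hx2⟩
      obtain ⟨g1, hg1, hx1e, hm1⟩ := (hmem1 _).mp hx1
      obtain ⟨g2, hg2, hx2e, hm2⟩ := (hmem2 _).mp ((PySem.Set.contains_iff _ _).mp hx2)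
      have hgg : g1 = g2 := List.inj_on_of_nodup_map pv_keys_nodup hg1 hg2 (hx1e ▸ hx2e)
      exact ⟨g1, hg1, Bool.and_eq_true_iff.mpr
        ⟨List.contains_iff_mem.mpr hm1, List.contains_iff_mem.mpr (hgg ▸ hm2)⟩⟩
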